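-- pv_equiv track=rewrite | github.com/BertRules/Global_reconstruction_of_language_models_with_linguistic_rules | rule/aspectrulemine.py | __get_term_pos_type_rhyp
-- ===== SOURCE A (Python) =====
-- def __get_term_pos_type_rhyp(term_pos_tags):
--     for t in term_pos_tags:
--         if t  == 'NO_RHYP':
--             return 'NO_RHYP'
--     for t in term_pos_tags:
--         if t != 'NO_RHYP':
--             return t
--     return None
-- ===== SOURCE B (Python) =====
-- def __get_term_pos_type_rhyp(term_pos_tags):
--     first = None
--     for t in term_pos_tags:
--         if t == 'NO_RHYP':
--             return 'NO_RHYP'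
--         if first is None:
--             first = t
--     return first
-- ===== Notes on version B (the rewrite author's own statement) =====
-- stated objective: simpler
-- what changed: Replaces A's two sequential scans with one stateful pass that returns NO_RHYP immediately and otherwise remembers the first tag seen.
import Mathlib
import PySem

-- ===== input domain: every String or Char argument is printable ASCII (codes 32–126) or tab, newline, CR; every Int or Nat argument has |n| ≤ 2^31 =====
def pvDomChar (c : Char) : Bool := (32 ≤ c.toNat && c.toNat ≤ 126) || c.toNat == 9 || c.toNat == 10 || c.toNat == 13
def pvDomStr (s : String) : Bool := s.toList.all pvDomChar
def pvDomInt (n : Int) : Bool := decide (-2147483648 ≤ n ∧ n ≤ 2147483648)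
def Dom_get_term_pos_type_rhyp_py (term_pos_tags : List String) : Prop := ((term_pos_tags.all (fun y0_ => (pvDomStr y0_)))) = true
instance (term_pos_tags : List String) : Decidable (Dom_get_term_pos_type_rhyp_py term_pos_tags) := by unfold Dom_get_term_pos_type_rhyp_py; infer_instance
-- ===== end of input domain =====

-- ===== PORT A =====
-- first loop: return 'NO_RHYP' on the first match
def pvScanNoRhyp : List String → Option String
  | [] => none
  | t :: ts => if t == "NO_RHYP" then some "NO_RHYP" else pvScanNoRhyp ts

-- second loop: return the first tag ≠ 'NO_RHYP'
def pvScanOther : List String → Option String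
  | [] => none
  | t :: ts => if t != "NO_RHYP" then some t else pvScanOther ts

def get_term_pos_type_rhyp_py (term_pos_tags : List String) : Option String :=
  match pvScanNoRhyp term_pos_tags with
  | some r => some r
  | none => pvScanOther term_pos_tags

-- ===== PORT B =====
-- single pass with a 'first' cell (B): early NO_RHYP return, else remember first tag
def pvAltGo (first : Option String) : List String → Option String
  | [] => first
  | t :: ts =>
      if t == "NO_RHYP" then some "NO_RHYP"
      else pvAltGo (if first.isNone then some t else first) ts

def get_term_pos_type_rhyp_py_alt (term_pos_tags : List String) : Option String :=
  pvAltGo none term_pos_tags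

-- ===== PRECONDITION & SPEC =====
def Spec_get_term_pos_type_rhyp_py (term_pos_tags : List String) (out : Option String) : Prop := out = get_term_pos_type_rhyp_py_alt term_pos_tags
instance (term_pos_tags : List String) (out : Option String) : Decidable (Spec_get_term_pos_type_rhyp_py term_pos_tags out) := by unfold Spec_get_term_pos_type_rhyp_py; infer_instance

-- ===== CLAIM (what is proved, stated in full; the proofs are below) =====
def Claim_equal_get_term_pos_type_rhyp_py : Prop := ∀ (term_pos_tags : List String), Dom_get_term_pos_type_rhyp_py term_pos_tags → Spec_get_term_pos_type_rhyp_py term_pos_tags (get_term_pos_type_rhyp_py term_pos_tags)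

-- ===== LEMMAS AND PROOFS =====

-- ===== VERDICT (by name: the statement is the Claim_ definition above) =====
lemma pvAltGo_spec : ∀ (xs : List String) (first : Option String),
    pvAltGo first xs =
      match pvScanNoRhyp xs with
      | some r => some r
      | none => first.or (pvScanOther xs) := by
  intro xs
  induction xs with
  | nil => intro first; cases first <;> simp [pvAltGo, pvScanNoRhyp, pvScanOther]
  | cons t ts ih =>
      intro first
      by_cases h : t = "NO_RHYP"
      · simp [pvAltGo, pvScanNoRhyp, h]
      · simp only [pvAltGo, pvScanNoRhyp, pvScanOther, h, beq_iff_eq,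
          bne_iff_ne, ne_eq, not_false_eq_true, if_pos, ih]
        cases hs : pvScanNoRhyp ts <;> cases first <;> simp [Option.or]

theorem get_term_pos_type_rhyp_py_spec : Claim_equal_get_term_pos_type_rhyp_py := by
  intro xs _
  unfold Spec_get_term_pos_type_rhyp_py get_term_pos_type_rhyp_py get_term_pos_type_rhyp_py_alt
  rw [pvAltGo_spec]
  cases pvScanNoRhyp xs <;> simp [Option.or]
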